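-- pv_equiv track=rewrite | github.com/Valerio1903/Manens_Toolbar | Manens.tab/Revit to Excel.panel/Revit to Excel ELE.pushbutton/script.py | SEP_chunk_consecutive_rows
-- ===== SOURCE A (Python) =====
-- def SEP_chunk_consecutive_rows(sorted_rows):
--     runs = []
--     if not sorted_rows: return runs
--     start_r = prev_r = sorted_rows[0]
--     for r in sorted_rows[1:]:
--         if r == prev_r + 1:
--             prev_r = r
--         else:
--             runs.append((start_r, prev_r))
--             start_r = prev_r = r
--     runs.append((start_r, prev_r))
--     return runs
-- ===== SOURCE B (Python) =====
-- def SEP_chunk_consecutive_rows(sorted_rows):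
--     runs = []
--     n = len(sorted_rows)
--     i = 0
--     while i < n:
--         j = i
--         while j + 1 < n and sorted_rows[j + 1] == sorted_rows[j] + 1:
--             j += 1
--         runs.append((sorted_rows[i], sorted_rows[j]))
--         i = j + 1
--     return runs
-- ===== Notes on version B (the rewrite author's own statement) =====
-- stated objective: alternative
-- what changed: Replaced A's single element-by-element loop carrying (runs, start, prev) accumulator state by an index-based two-pointer scan: an inner scan advances j to the end of the consecutive run starting at i, one (rows[i], rows[j]) pair is emitted per run, and i jumps to j+1.
import Mathlib
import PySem

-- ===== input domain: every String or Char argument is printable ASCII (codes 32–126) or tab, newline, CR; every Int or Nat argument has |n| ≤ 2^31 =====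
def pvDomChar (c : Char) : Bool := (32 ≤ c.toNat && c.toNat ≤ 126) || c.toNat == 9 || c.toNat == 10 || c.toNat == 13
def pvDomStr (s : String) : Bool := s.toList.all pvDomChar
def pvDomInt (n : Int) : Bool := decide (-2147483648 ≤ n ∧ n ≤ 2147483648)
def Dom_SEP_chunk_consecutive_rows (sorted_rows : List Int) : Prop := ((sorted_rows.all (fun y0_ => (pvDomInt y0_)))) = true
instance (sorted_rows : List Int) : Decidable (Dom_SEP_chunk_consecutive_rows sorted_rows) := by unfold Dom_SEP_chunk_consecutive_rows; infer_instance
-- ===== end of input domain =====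

-- B replaces A's (runs, start, prev) accumulator loop by an index-based two-pointer run scan; objective: alternative structure, same cost.

-- ===== PORT A =====
-- A: fold over sorted_rows[1:] carrying (runs, start_r, prev_r), then append the final run.
def SEP_chunk_consecutive_rows (sorted_rows : List Int) : List (Int × Int) :=
  match sorted_rows with
  | [] => []
  | r0 :: rest =>
    let st := rest.foldl
      (fun (s : List (Int × Int) × Int × Int) r =>
        if r = s.2.2 + 1 then (s.1, s.2.1, r)
        else (s.1 ++ [(s.2.1, s.2.2)], r, r))
      ([], r0, r0)
    st.1 ++ [(st.2.1, st.2.2)]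

-- ===== PORT B =====
-- inner `while j + 1 < n and sorted_rows[j+1] == sorted_rows[j] + 1: j += 1`
-- (indices stay in range by the loop guard, so getD is exact for Python's xs[j])
def pvFindEnd (xs : List Int) (n j : Nat) : Nat :=
  if _h : j + 1 < n then
    if xs.getD (j + 1) 0 = xs.getD j 0 + 1 then pvFindEnd xs n (j + 1) else j
  else j
termination_by n - j

theorem pvFindEnd_ge (xs : List Int) (n j : Nat) : j ≤ pvFindEnd xs n j := by
  unfold pvFindEnd
  split
  · split
    · exact Nat.le_trans (Nat.le_succ j) (pvFindEnd_ge xs n (j + 1))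
    · exact Nat.le_refl j
  · exact Nat.le_refl j
termination_by n - j

-- outer `while i < n:` loop, emitting one (xs[i], xs[j]) pair per run
def pvScan (xs : List Int) (n i : Nat) : List (Int × Int) :=
  if _h : i < n then
    (xs.getD i 0, xs.getD (pvFindEnd xs n i) 0) :: pvScan xs n (pvFindEnd xs n i + 1)
  else []
termination_by n - i
decreasing_by have := pvFindEnd_ge xs n i; omega

def SEP_chunk_consecutive_rows_alt (sorted_rows : List Int) : List (Int × Int) :=
  pvScan sorted_rows sorted_rows.length 0

-- ===== PRECONDITION & SPEC =====
def Spec_SEP_chunk_consecutive_rows (sorted_rows : List Int) (out : List (Int × Int)) : Prop := out = SEP_chunk_consecutive_rows_alt sorted_rows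
instance (sorted_rows : List Int) (out : List (Int × Int)) : Decidable (Spec_SEP_chunk_consecutive_rows sorted_rows out) := by unfold Spec_SEP_chunk_consecutive_rows; infer_instance

-- ===== CLAIM (what is proved, stated in full; the proofs are below) =====
def Claim_equal_SEP_chunk_consecutive_rows : Prop := ∀ (sorted_rows : List Int), Dom_SEP_chunk_consecutive_rows sorted_rows → Spec_SEP_chunk_consecutive_rows sorted_rows (SEP_chunk_consecutive_rows sorted_rows)

-- ===== LEMMAS AND PROOFS =====

-- canonical recursive description of the run decomposition
def pvChunks (s p : Int) : List Int → List (Int × Int)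
  | [] => [(s, p)]
  | r :: rest => if r = p + 1 then pvChunks s r rest else (s, p) :: pvChunks r r rest

theorem foldA_eq_chunks (rest : List Int) :
    ∀ (runs : List (Int × Int)) (s p : Int),
      (let st := rest.foldl
        (fun (st : List (Int × Int) × Int × Int) r =>
          if r = st.2.2 + 1 then (st.1, st.2.1, r)
          else (st.1 ++ [(st.2.1, st.2.2)], r, r))
        (runs, s, p)
       st.1 ++ [(st.2.1, st.2.2)]) = runs ++ pvChunks s p rest := by
  induction rest with
  | nil => intro runs s p; simp [pvChunks]
  | cons r rest ih =>
    intro runs s p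
    simp only [List.foldl_cons, pvChunks]
    by_cases h : r = p + 1
    · simp [h, ih]
    · simp [h, ih, List.append_assoc]

theorem scan_eq_chunks (k : Nat) (xs : List Int) :
    ∀ (j : Nat) (s : Int), xs.length - j ≤ k → j < xs.length →
      (s, xs.getD (pvFindEnd xs xs.length j) 0) :: pvScan xs xs.length (pvFindEnd xs xs.length j + 1)
        = pvChunks s (xs.getD j 0) (xs.drop (j + 1)) := by
  induction k with
  | zero => intro j s hk hj; omega
  | succ k ih =>
    intro j s hk hj
    by_cases h1 : j + 1 < xs.length
    · have hdrop : xs.drop (j + 1) = xs.getD (j + 1) 0 :: xs.drop (j + 1 + 1) := by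
        rw [List.drop_eq_getElem_cons h1, List.getD_eq_getElem _ _ h1]
      by_cases h2 : xs.getD (j + 1) 0 = xs.getD j 0 + 1
      · have hfe : pvFindEnd xs xs.length j = pvFindEnd xs xs.length (j + 1) := by
          rw [pvFindEnd, dif_pos h1, if_pos h2]
        rw [hfe, hdrop, pvChunks, if_pos h2]
        exact ih (j + 1) s (by omega) h1
      · have hfe : pvFindEnd xs xs.length j = j := by
          rw [pvFindEnd, dif_pos h1, if_neg h2]
        rw [hfe, hdrop, pvChunks, if_neg h2, pvScan, dif_pos h1,
          ← ih (j + 1) (xs.getD (j + 1) 0) (by omega) h1]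
    · have hfe : pvFindEnd xs xs.length j = j := by
        rw [pvFindEnd, dif_neg h1]
      have hdrop : xs.drop (j + 1) = [] := List.drop_eq_nil_of_le (by omega)
      rw [hfe, hdrop, pvChunks, pvScan, dif_neg h1]

-- ===== VERDICT (by name: the statement is the Claim_ definition above) =====
theorem SEP_chunk_consecutive_rows_spec : Claim_equal_SEP_chunk_consecutive_rows := by
  intro xs _
  unfold Spec_SEP_chunk_consecutive_rows SEP_chunk_consecutive_rows SEP_chunk_consecutive_rows_alt
  match xs with
  | [] => rw [pvScan]; simp
  | r0 :: rest =>
    have hlen : 0 < (r0 :: rest).length := by simp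
    rw [pvScan]
    simp only [hlen, dif_pos]
    rw [scan_eq_chunks ((r0 :: rest).length) (r0 :: rest) 0 ((r0 :: rest).getD 0 0)
        (by omega) hlen]
    simp only [List.getD, List.getElem?_cons_zero, Option.getD_some]
    exact foldA_eq_chunks rest [] r0 r0
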